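-- pv_equiv track=rewrite | github.com/perctrix/portfolio_manager | backend/app/core/symbol_resolver.py | _extract_exchange_from_suffix
-- ===== SOURCE A (Python) =====
-- def _extract_exchange_from_suffix(symbol: str) -> str:
--     """Extract exchange code from symbol suffix."""
--     for suffix in ['.DE', '.PA', '.L', '.HK', '.TW', '.TO', '.T', '.SS', '.SZ',
--                    '.AX', '.SW', '.SI', '.ST', '.OL', '.CO', '.KS', '.KQ',
--                    '.MI', '.AS', '.BR', '.MC', '.VI', '.V', '.CN', '.NE',
--                    '.NS', '.BO', '.NZ', '.MX', '.SA', '.JO', '.IL', '.OS',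
--                    '.NG', '.F', '.TWO', '.VX']:
--         if symbol.endswith(suffix):
--             return suffix.lstrip('.')
--     return 'UNKNOWN'
-- ===== SOURCE B (Python) =====
-- _EXCHANGE_CODES = {'DE', 'PA', 'L', 'HK', 'TW', 'TO', 'T', 'SS', 'SZ',
--                    'AX', 'SW', 'SI', 'ST', 'OL', 'CO', 'KS', 'KQ',
--                    'MI', 'AS', 'BR', 'MC', 'VI', 'V', 'CN', 'NE',
--                    'NS', 'BO', 'NZ', 'MX', 'SA', 'JO', 'IL', 'OS',
--                    'NG', 'F', 'TWO', 'VX'}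
--
--
-- def _extract_exchange_from_suffix(symbol: str) -> str:
--     """Extract exchange code from symbol suffix.
--
--     Single pass: track the text seen since the most recent dot,
--     then decide with one set lookup."""
--     tail = None  # characters after the most recent '.', or None if no dot yet
--     for ch in symbol:
--         if ch == '.':
--             tail = ''
--         elif tail is not None:
--             tail += ch
--     if tail is not None and tail in _EXCHANGE_CODES:
--         return tail
--     return 'UNKNOWN'
-- ===== Notes on version B (the rewrite author's own statement) =====
-- stated objective: alternative
-- what changed: Replaces the 37-way endswith scan with a single left-to-right pass that tracks the characters seen since the most recent dot, followed by one set-membership test of that candidate suffix.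
import Mathlib
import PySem

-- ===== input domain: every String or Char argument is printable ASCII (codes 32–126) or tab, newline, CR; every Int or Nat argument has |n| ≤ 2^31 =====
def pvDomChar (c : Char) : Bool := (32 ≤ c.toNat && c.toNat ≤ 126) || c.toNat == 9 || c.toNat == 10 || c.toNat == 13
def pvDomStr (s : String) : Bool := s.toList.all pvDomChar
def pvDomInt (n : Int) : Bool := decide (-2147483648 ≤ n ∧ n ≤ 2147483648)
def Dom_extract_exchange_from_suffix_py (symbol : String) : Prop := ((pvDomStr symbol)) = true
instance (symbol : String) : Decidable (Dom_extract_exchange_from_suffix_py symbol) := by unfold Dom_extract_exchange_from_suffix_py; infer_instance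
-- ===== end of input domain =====

-- B replaces A's 37-way endswith scan with a single pass tracking the text since the
-- most recent dot plus one set lookup (objective: alternative; same asymptotic cost).


-- ===== PORT A =====
-- exact port of str.lstrip('.'): drop leading '.' characters
def pyLstripDot (s : String) : String := String.ofList (s.toList.dropWhile (fun c => c == '.'))

def suffixListA : List String :=
  [".DE", ".PA", ".L", ".HK", ".TW", ".TO", ".T", ".SS", ".SZ",
   ".AX", ".SW", ".SI", ".ST", ".OL", ".CO", ".KS", ".KQ",
   ".MI", ".AS", ".BR", ".MC", ".VI", ".V", ".CN", ".NE",
   ".NS", ".BO", ".NZ", ".MX", ".SA", ".JO", ".IL", ".OS",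
   ".NG", ".F", ".TWO", ".VX"]

-- the for-loop over the suffix literals: first endswith match wins
def goA (symbol : String) : List String → String
  | [] => "UNKNOWN"
  | suf :: rest =>
      if PySem.Str.endswith symbol suf then pyLstripDot suf else goA symbol rest

def extract_exchange_from_suffix_py (symbol : String) : String :=
  goA symbol suffixListA

-- ===== PORT B =====
def exchangeCodesB : PySem.Set String :=
  PySem.Set.ofList
    ["DE", "PA", "L", "HK", "TW", "TO", "T", "SS", "SZ",
     "AX", "SW", "SI", "ST", "OL", "CO", "KS", "KQ",
     "MI", "AS", "BR", "MC", "VI", "V", "CN", "NE",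
     "NS", "BO", "NZ", "MX", "SA", "JO", "IL", "OS",
     "NG", "F", "TWO", "VX"]

-- one loop step: a dot resets the accumulator to '', other chars extend it if a dot was seen
def stepB (tail : Option (List Char)) (ch : Char) : Option (List Char) :=
  if ch == '.' then some []
  else match tail with
       | none => none
       | some t => some (t ++ [ch])

def extract_exchange_from_suffix_py_alt (symbol : String) : String :=
  match symbol.toList.foldl stepB none with
  | some t => if PySem.Set.contains exchangeCodesB (String.ofList t) then String.ofList t else "UNKNOWN"
  | none => "UNKNOWN"

-- ===== PRECONDITION & SPEC =====
def Spec_extract_exchange_from_suffix_py (symbol : String) (out : String) : Prop := out = extract_exchange_from_suffix_py_alt symbol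
instance (symbol : String) (out : String) : Decidable (Spec_extract_exchange_from_suffix_py symbol out) := by unfold Spec_extract_exchange_from_suffix_py; infer_instance

-- ===== CLAIM (what is proved, stated in full; the proofs are below) =====
def Claim_equal_extract_exchange_from_suffix_py : Prop := ∀ (symbol : String), Dom_extract_exchange_from_suffix_py symbol → Spec_extract_exchange_from_suffix_py symbol (extract_exchange_from_suffix_py symbol)

-- ===== LEMMAS AND PROOFS =====

-- the code strings, without their dots
def codeStrs : List String :=
  ["DE", "PA", "L", "HK", "TW", "TO", "T", "SS", "SZ",
   "AX", "SW", "SI", "ST", "OL", "CO", "KS", "KQ",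
   "MI", "AS", "BR", "MC", "VI", "V", "CN", "NE",
   "NS", "BO", "NZ", "MX", "SA", "JO", "IL", "OS",
   "NG", "F", "TWO", "VX"]

lemma suffixListA_eq : suffixListA = codeStrs.map (fun c => "." ++ c) := by decide

lemma codeStrs_no_dot : ∀ c ∈ codeStrs, '.' ∉ c.toList := by decide

lemma exchangeCodesB_eq : exchangeCodesB = codeStrs := by decide

-- folding over dot-free characters just appends them
lemma foldl_stepB_some (t : List Char) (s : List Char) (h : '.' ∉ t) :
    t.foldl stepB (some s) = some (s ++ t) := by
  induction t generalizing s with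
  | nil => simp
  | cons c t ih =>
      have hc : c ≠ '.' := by intro hcc; exact h (hcc ▸ List.mem_cons_self ..)
      have h' : '.' ∉ t := fun hm => h (List.mem_cons_of_mem _ hm)
      simp [stepB, hc, ih _ h']

lemma foldl_stepB_after_dot (xs t : List Char) (h : '.' ∉ t) :
    (xs ++ '.' :: t).foldl stepB none = some t := by
  have : (xs ++ '.' :: t) = (xs ++ ['.']) ++ t := by simp
  rw [this, List.foldl_append, List.foldl_append]
  simp [stepB, foldl_stepB_some t [] h]

lemma foldl_stepB_some_iff (l t : List Char) :
    l.foldl stepB none = some t ↔ (∃ xs, l = xs ++ '.' :: t) ∧ '.' ∉ t := by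
  constructor
  · intro h
    induction l using List.reverseRecOn generalizing t with
    | nil => simp [List.foldl] at h
    | append_singleton xs c ih =>
        rw [List.foldl_append] at h
        by_cases hc : c = '.'
        · subst hc
          simp [stepB] at h
          subst h
          exact ⟨⟨xs, by simp⟩, by simp⟩
        · cases hx : xs.foldl stepB none with
          | none => rw [hx] at h; simp [stepB, hc] at h
          | some t' =>
              rw [hx] at h
              simp [stepB, hc] at h
              obtain ⟨⟨ys, hys⟩, hnd⟩ := ih t' hx
              refine ⟨⟨ys, ?_⟩, ?_⟩
              · rw [hys, ← h]; simp
              · rw [← h]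
                simp [hnd]
                exact fun hcc => hc hcc.symm
  · rintro ⟨⟨xs, rfl⟩, hnd⟩
    exact foldl_stepB_after_dot xs t hnd

-- A's endswith test, characterised by the fold
lemma endswith_iff_fold (l c : List Char) (hc : '.' ∉ c) :
    PySem.Chars.endswith l ('.' :: c) = true ↔ l.foldl stepB none = some c := by
  rw [PySem.Chars.endswith_iff, foldl_stepB_some_iff]
  constructor
  · rintro ⟨xs, rfl⟩; exact ⟨⟨xs, rfl⟩, hc⟩
  · rintro ⟨⟨xs, rfl⟩, _⟩; exact ⟨xs, rfl⟩

lemma pyLstripDot_dot (c : String) (hc : '.' ∉ c.toList) : pyLstripDot ("." ++ c) = c := by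
  unfold pyLstripDot
  have h1 : ("." ++ c).toList = '.' :: c.toList := by simp
  rw [h1]
  have h2 : c.toList.dropWhile (fun ch => ch == '.') = c.toList := by
    cases hcl : c.toList with
    | nil => simp
    | cons x xs =>
        have hx : x ≠ '.' := by intro hx; exact hc (by rw [hcl, hx]; exact List.mem_cons_self ..)
        simp [hx]
  rw [List.dropWhile_cons]
  simp [h2, String.ofList_toList]

-- the scan over mapped suffixes, when the fold found tail t
lemma goA_map_some (cs : List String) (s : String) (t : List Char)
    (hF : s.toList.foldl stepB none = some t) (hnd : ∀ c ∈ cs, '.' ∉ c.toList) :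
    goA s (cs.map (fun c => "." ++ c)) =
      if cs.any (fun c => c.toList == t) then String.ofList t else "UNKNOWN" := by
  induction cs with
  | nil => simp [goA]
  | cons c cs ih =>
      have hc : '.' ∉ c.toList := hnd c (List.mem_cons_self ..)
      have hrest : ∀ x ∈ cs, '.' ∉ x.toList := fun x hx => hnd x (List.mem_cons_of_mem _ hx)
      have hE : PySem.Str.endswith s ("." ++ c) = true ↔ s.toList.foldl stepB none = some c.toList := by
        rw [PySem.Str.endswith_eq]
        have h1 : ("." ++ c).toList = '.' :: c.toList := by simp
        rw [h1]
        exact endswith_iff_fold s.toList c.toList hc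
      simp only [List.map_cons, goA]
      by_cases ht : c.toList = t
      · have hT : PySem.Str.endswith s ("." ++ c) = true := hE.mpr (ht ▸ hF)
        have hany : ((c :: cs).any fun c => c.toList == t) = true := by
          simp [List.any_cons, ht]
        rw [hT, if_pos rfl, hany, if_pos rfl, pyLstripDot_dot c hc, ← ht, String.ofList_toList]
      · have : PySem.Str.endswith s ("." ++ c) = false := by
          rw [Bool.eq_false_iff]
          intro hcon
          have := hE.mp hcon
          rw [hF] at this
          exact ht (Option.some.injEq .. ▸ this).symm
        rw [this]
        simp only [Bool.false_eq_true, if_false]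
        rw [ih hrest]
        have : (c.toList == t) = false := by simp [ht]
        simp [this]

-- the scan over mapped suffixes, when no dot was seen: every endswith fails
lemma goA_map_none (cs : List String) (s : String)
    (hF : s.toList.foldl stepB none = none) (hnd : ∀ c ∈ cs, '.' ∉ c.toList) :
    goA s (cs.map (fun c => "." ++ c)) = "UNKNOWN" := by
  induction cs with
  | nil => simp [goA]
  | cons c cs ih =>
      have hc : '.' ∉ c.toList := hnd c (List.mem_cons_self ..)
      have hrest : ∀ x ∈ cs, '.' ∉ x.toList := fun x hx => hnd x (List.mem_cons_of_mem _ hx)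
      have hfalse : PySem.Str.endswith s ("." ++ c) = false := by
        rw [Bool.eq_false_iff]
        intro hcon
        rw [PySem.Str.endswith_eq] at hcon
        have h1 : ("." ++ c).toList = '.' :: c.toList := by simp
        rw [h1] at hcon
        have := (endswith_iff_fold s.toList c.toList hc).mp hcon
        rw [hF] at this
        simp at this
      simp only [List.map_cons, goA, hfalse, Bool.false_eq_true, if_false]
      exact ih hrest

-- membership bridge: any (toList-equality) over codeStrs = Set.contains of B's set
lemma any_eq_contains (t : List Char) :
    codeStrs.any (fun c => c.toList == t) = PySem.Set.contains exchangeCodesB (String.ofList t) := by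
  rw [exchangeCodesB_eq]
  have hb : ∀ (c : String), (c.toList == t) = (c == String.ofList t) := by
    intro c
    by_cases h : c.toList = t
    · have hc : c = String.ofList t := by rw [← h, String.ofList_toList]
      simp [hc]
    · have hc : c ≠ String.ofList t := by
        intro he; apply h; rw [he, String.toList_ofList]
      simp [h, hc]
  simp only [hb]
  rw [Bool.eq_iff_iff]
  simp [PySem.Set.contains, List.any_eq_true]

-- ===== VERDICT (by name: the statement is the Claim_ definition above) =====
theorem extract_exchange_from_suffix_py_spec : Claim_equal_extract_exchange_from_suffix_py := by
  intro symbol _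
  unfold Spec_extract_exchange_from_suffix_py extract_exchange_from_suffix_py extract_exchange_from_suffix_py_alt
  rw [suffixListA_eq]
  cases hF : symbol.toList.foldl stepB none with
  | none => rw [goA_map_none codeStrs symbol hF codeStrs_no_dot]
  | some t =>
      rw [goA_map_some codeStrs symbol t hF codeStrs_no_dot, any_eq_contains t]
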